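-- pv_equiv track=rewrite | github.com/Link1565/MewgenicsCN | auto_wrap.py | is_inside_tag
-- ===== SOURCE A (Python) =====
-- def is_inside_tag(text, pos):
--     """检查位置是否在[...]或{...}标签内"""
--     # 向前查找未闭合的[或{
--     depth_sq = 0
--     depth_br = 0
--     for i in range(pos, -1, -1):
--         if text[i] == ']':
--             depth_sq += 1
--         elif text[i] == '[':
--             depth_sq -= 1
--             if depth_sq < 0:
--                 return True
--         elif text[i] == '}':
--             depth_br += 1
--         elif text[i] == '{':
--             depth_br -= 1
--             if depth_br < 0:
--                 return True
--     return False
-- ===== SOURCE B (Python) =====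
-- def is_inside_tag(text, pos):
--     """检查位置是否在[...]或{...}标签内"""
--     # forward single pass over text[0..pos], clamping each depth at 0
--     depth_sq = 0
--     depth_br = 0
--     for i in range(0, pos + 1):
--         c = text[i]
--         if c == '[':
--             depth_sq += 1
--         elif c == ']':
--             depth_sq = max(0, depth_sq - 1)
--         elif c == '{':
--             depth_br += 1
--         elif c == '}':
--             depth_br = max(0, depth_br - 1)
--     return depth_sq > 0 or depth_br > 0
-- ===== Notes on version B (the rewrite author's own statement) =====
-- stated objective: alternative
-- what changed: Replaces A's backward scan from pos with early-return on the first unmatched opener by a forward single pass over text[0..pos] that keeps zero-clamped depth counters and decides at the end.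
import Mathlib
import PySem

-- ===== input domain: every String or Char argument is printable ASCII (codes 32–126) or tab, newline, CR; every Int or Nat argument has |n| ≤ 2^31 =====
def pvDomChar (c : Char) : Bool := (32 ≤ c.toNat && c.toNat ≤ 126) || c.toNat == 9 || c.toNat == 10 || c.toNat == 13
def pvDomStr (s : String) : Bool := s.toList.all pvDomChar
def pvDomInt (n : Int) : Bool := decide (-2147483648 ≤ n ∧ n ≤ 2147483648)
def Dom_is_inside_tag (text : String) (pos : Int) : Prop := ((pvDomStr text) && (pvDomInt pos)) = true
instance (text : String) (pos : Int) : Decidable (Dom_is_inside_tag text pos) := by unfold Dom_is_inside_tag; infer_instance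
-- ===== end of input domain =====

-- B replaces A's backward early-return scan from pos by a forward pass over text[0..pos] with zero-clamped depth counters decided at the end (alternative decomposition, same cost).

-- ===== PORT A =====
-- backward loop over range(pos, -1, -1); 'none' from pyGet? is the IndexError case (excluded by Pre_)
def aLoop (cs : List Char) : List Int → Int → Int → Bool
  | [], _, _ => false
  | i :: rest, dsq, dbr =>
    match PySem.List.pyGet? cs i with
    | none => false
    | some c =>
      if c = ']' then aLoop cs rest (dsq + 1) dbr
      else if c = '[' then
        if dsq - 1 < 0 then true else aLoop cs rest (dsq - 1) dbr
      else if c = '}' then aLoop cs rest dsq (dbr + 1)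
      else if c = '{' then
        if dbr - 1 < 0 then true else aLoop cs rest dsq (dbr - 1)
      else aLoop cs rest dsq dbr

def is_inside_tag (text : String) (pos : Int) : Bool :=
  aLoop text.toList (PySem.List.pyRange pos (-1) (-1)) 0 0

-- ===== PORT B =====
-- one step of B's forward loop; 'none' from pyGet? is the IndexError case (excluded by Pre_)
def bStep (cs : List Char) (st : Int × Int) (i : Int) : Int × Int :=
  match PySem.List.pyGet? cs i with
  | none => st
  | some c =>
    if c = '[' then (st.1 + 1, st.2)
    else if c = ']' then (max 0 (st.1 - 1), st.2)
    else if c = '{' then (st.1, st.2 + 1)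
    else if c = '}' then (st.1, max 0 (st.2 - 1))
    else st

def is_inside_tag_alt (text : String) (pos : Int) : Bool :=
  ((PySem.List.pyRange 0 (pos + 1) 1).foldl (bStep text.toList) (0, 0)).1 > 0
  || ((PySem.List.pyRange 0 (pos + 1) 1).foldl (bStep text.toList) (0, 0)).2 > 0

-- ===== PRECONDITION & SPEC =====
-- Pre_ excludes exactly pos ≥ len(text), where both Pythons raise IndexError; negative pos stays inside (empty loop, False)
def Pre_is_inside_tag (text : String) (pos : Int) : Prop := pos < (text.toList.length : Int)
instance (text : String) (pos : Int) : Decidable (Pre_is_inside_tag text pos) := by unfold Pre_is_inside_tag; infer_instance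
def pvWitness_is_inside_tag : String × Int := ("a[b]c{", 5)
def Spec_is_inside_tag (text : String) (pos : Int) (out : Bool) : Prop := out = is_inside_tag_alt text pos
instance (text : String) (pos : Int) (out : Bool) : Decidable (Spec_is_inside_tag text pos out) := by unfold Spec_is_inside_tag; infer_instance

-- ===== CLAIM =====
def Claim_equal_is_inside_tag : Prop := ∀ (text : String) (pos : Int), Dom_is_inside_tag text pos → Pre_is_inside_tag text pos → Spec_is_inside_tag text pos (is_inside_tag text pos)

-- ===== LEMMAS AND PROOFS =====

-- pure (char-level) version of B's clamped step
def gstep (st : Int × Int) (c : Char) : Int × Int :=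
  if c = '[' then (st.1 + 1, st.2)
  else if c = ']' then (max 0 (st.1 - 1), st.2)
  else if c = '{' then (st.1, st.2 + 1)
  else if c = '}' then (st.1, max 0 (st.2 - 1))
  else st

-- pure (char-level) version of A's backward scan, fed the reversed prefix
def fpure : List Char → Int → Int → Bool
  | [], _, _ => false
  | c :: r, dsq, dbr =>
    if c = ']' then fpure r (dsq + 1) dbr
    else if c = '[' then
      if dsq - 1 < 0 then true else fpure r (dsq - 1) dbr
    else if c = '}' then fpure r dsq (dbr + 1)
    else if c = '{' then
      if dbr - 1 < 0 then true else fpure r dsq (dbr - 1)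
    else fpure r dsq dbr

lemma gstep_nonneg (st : Int × Int) (c : Char) (h1 : 0 ≤ st.1) (h2 : 0 ≤ st.2) :
    0 ≤ (gstep st c).1 ∧ 0 ≤ (gstep st c).2 := by
  unfold gstep; split_ifs <;> exact ⟨by omega, by omega⟩

lemma gfold_nonneg (p : List Char) (st : Int × Int) (h1 : 0 ≤ st.1) (h2 : 0 ≤ st.2) :
    0 ≤ (p.foldl gstep st).1 ∧ 0 ≤ (p.foldl gstep st).2 := by
  induction p generalizing st with
  | nil => exact ⟨h1, h2⟩
  | cons c r ih =>
    simp only [List.foldl_cons]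
    exact ih _ (gstep_nonneg st c h1 h2).1 (gstep_nonneg st c h1 h2).2

-- core: A's backward early-return scan of r = B's forward clamped count of r.reverse exceeding the starting debts
lemma fpure_eq_gfold (r : List Char) (dsq dbr : Int) (h1 : 0 ≤ dsq) (h2 : 0 ≤ dbr) :
    fpure r dsq dbr
      = decide (dsq < (r.reverse.foldl gstep (0, 0)).1 ∨ dbr < (r.reverse.foldl gstep (0, 0)).2) := by
  induction r generalizing dsq dbr with
  | nil => simp [fpure]; omega
  | cons c r ih =>
    obtain ⟨hG1, hG2⟩ := gfold_nonneg r.reverse (0, 0) (by simp) (by simp)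
    rw [List.reverse_cons, List.foldl_append, List.foldl_cons, List.foldl_nil]
    by_cases e1 : c = ']'
    · subst e1
      rw [show fpure (']' :: r) dsq dbr = fpure r (dsq + 1) dbr from by simp [fpure]]
      rw [show gstep (r.reverse.foldl gstep (0, 0)) ']'
            = (max 0 ((r.reverse.foldl gstep (0, 0)).1 - 1), (r.reverse.foldl gstep (0, 0)).2)
          from by simp [gstep]]
      rw [ih _ _ (by omega) h2, decide_eq_decide]
      constructor <;> intro h <;> simp at * <;> omega
    by_cases e2 : c = '['
    · subst e2
      rw [show fpure ('[' :: r) dsq dbr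
            = (if dsq - 1 < 0 then true else fpure r (dsq - 1) dbr) from by simp [fpure]]
      rw [show gstep (r.reverse.foldl gstep (0, 0)) '['
            = ((r.reverse.foldl gstep (0, 0)).1 + 1, (r.reverse.foldl gstep (0, 0)).2)
          from by simp [gstep]]
      split_ifs with hz
      · exact (decide_eq_true (Or.inl (by omega))).symm
      · rw [ih _ _ (by omega) h2, decide_eq_decide]
        constructor <;> intro h <;> simp at * <;> omega
    by_cases e3 : c = '}'
    · subst e3
      rw [show fpure ('}' :: r) dsq dbr = fpure r dsq (dbr + 1) from by simp [fpure]]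
      rw [show gstep (r.reverse.foldl gstep (0, 0)) '}'
            = ((r.reverse.foldl gstep (0, 0)).1, max 0 ((r.reverse.foldl gstep (0, 0)).2 - 1))
          from by simp [gstep]]
      rw [ih _ _ h1 (by omega), decide_eq_decide]
      constructor <;> intro h <;> simp at * <;> omega
    by_cases e4 : c = '{'
    · subst e4
      rw [show fpure ('{' :: r) dsq dbr
            = (if dbr - 1 < 0 then true else fpure r dsq (dbr - 1)) from by simp [fpure]]
      rw [show gstep (r.reverse.foldl gstep (0, 0)) '{'
            = ((r.reverse.foldl gstep (0, 0)).1, (r.reverse.foldl gstep (0, 0)).2 + 1)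
          from by simp [gstep]]
      split_ifs with hz
      · exact (decide_eq_true (Or.inr (by omega))).symm
      · rw [ih _ _ h1 (by omega), decide_eq_decide]
        constructor <;> intro h <;> simp at * <;> omega
    · rw [show fpure (c :: r) dsq dbr = fpure r dsq dbr from by simp [fpure, e1, e2, e3, e4]]
      rw [show gstep (r.reverse.foldl gstep (0, 0)) c = r.reverse.foldl gstep (0, 0)
          from by simp [gstep, e1, e2, e3, e4]]
      exact ih _ _ h1 h2

lemma bStep_eq_gstep (cs : List Char) (st : Int × Int) (k : Nat) (hk : k < cs.length) :
    bStep cs st (k : Int) = gstep st cs[k] := by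
  simp [bStep, gstep, PySem.List.pyGet?_natCast, List.getElem?_eq_getElem hk]

lemma bfold_eq_gfold (cs : List Char) (m : Nat) (hm : m ≤ cs.length) (st : Int × Int) :
    (PySem.List.pyRange 0 (m : Int) 1).foldl (bStep cs) st = (cs.take m).foldl gstep st := by
  induction m generalizing st with
  | zero => simp [PySem.List.pyRange_one_eq_nil]
  | succ n ih =>
    have hn : n < cs.length := by omega
    rw [show ((n + 1 : Nat) : Int) = (n : Int) + 1 by push_cast; ring,
        PySem.List.pyRange_one_succ_right (by omega),
        List.take_add_one, List.foldl_append, List.foldl_append, ih (by omega)]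
    simp [List.getElem?_eq_getElem hn, bStep_eq_gstep cs _ n hn]

lemma aLoop_eq_fpure (cs : List Char) (m : Nat) (hm : m ≤ cs.length) (dsq dbr : Int) :
    aLoop cs (PySem.List.pyRange ((m : Int) - 1) (-1) (-1)) dsq dbr
      = fpure (cs.take m).reverse dsq dbr := by
  induction m generalizing dsq dbr with
  | zero => simp [PySem.List.pyRange_neg_one_eq_nil, aLoop, fpure]
  | succ n ih =>
    have hn : n < cs.length := by omega
    rw [show (((n + 1 : Nat) : Int) - 1) = (n : Int) by push_cast; ring,
        PySem.List.pyRange_neg_one_cons (by omega), List.take_add_one]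
    simp only [List.getElem?_eq_getElem hn, Option.toList_some, List.reverse_append,
      List.reverse_cons, List.reverse_nil, List.nil_append, List.cons_append]
    have hget : PySem.List.pyGet? cs ((n : Nat) : Int) = some cs[n] := by
      simp [PySem.List.pyGet?_natCast, List.getElem?_eq_getElem hn]
    simp only [aLoop, fpure, hget]
    have ih' := fun dsq dbr => ih (by omega) dsq dbr
    rw [show ((n : Int) - 1) = (((n : Nat) : Int) - 1) by norm_num] at ih'
    split_ifs <;> first | rfl | exact ih' _ _

-- ===== VERDICT =====
theorem is_inside_tag_spec : Claim_equal_is_inside_tag := by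
  intro text pos _ hpre
  unfold Pre_is_inside_tag at hpre
  unfold Spec_is_inside_tag is_inside_tag is_inside_tag_alt
  by_cases hneg : pos < 0
  · rw [PySem.List.pyRange_neg_one_eq_nil (by omega), PySem.List.pyRange_one_eq_nil (by omega)]
    simp [aLoop]
  · have hm : pos.toNat + 1 ≤ text.toList.length := by omega
    have hA : aLoop text.toList (PySem.List.pyRange pos (-1) (-1)) 0 0
        = fpure (text.toList.take (pos.toNat + 1)).reverse 0 0 := by
      have h := aLoop_eq_fpure text.toList (pos.toNat + 1) hm 0 0
      rw [show (((pos.toNat + 1 : Nat) : Int) - 1) = pos by omega] at h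
      exact h
    rw [hA, show pos + 1 = ((pos.toNat + 1 : Nat) : Int) by omega,
        bfold_eq_gfold text.toList (pos.toNat + 1) hm (0, 0),
        fpure_eq_gfold _ 0 0 le_rfl le_rfl, List.reverse_reverse]
    simp
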